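-- pv_equiv track=rewrite | github.com/Vishalan/social_media | scripts/broll_gen/tweet_reveal.py | _avatar_initial
-- ===== SOURCE A (Python) =====
-- def _avatar_initial(author: str) -> str:
--     """Pick a single uppercase letter for the avatar circle.
--
--     First alphanumeric letter of the author string; falls back to ``"?"`` for
--     empty or non-alphanumeric strings.
--     """
--     for ch in author:
--         if ch.isalpha():
--             return ch.upper()
--     for ch in author:
--         if ch.isalnum():
--             return ch.upper()
--     return "?"
-- ===== SOURCE B (Python) =====
-- def _avatar_initial(author: str) -> str:
--     """Single pass: return the first alphabetic char uppercased immediately;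
--     otherwise remember the first alphanumeric char and fall back to it (or '?')."""
--     first_alnum = None
--     for ch in author:
--         if ch.isalpha():
--             return ch.upper()
--         if first_alnum is None and ch.isalnum():
--             first_alnum = ch
--     return first_alnum.upper() if first_alnum is not None else "?"
-- ===== Notes on version B (the rewrite author's own statement) =====
-- stated objective: alternative
-- what changed: Replaces A's two sequential scans (one for letters, one for alphanumerics) with a single pass that returns on the first letter and remembers the first alphanumeric for the fallback.
import Mathlib
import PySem

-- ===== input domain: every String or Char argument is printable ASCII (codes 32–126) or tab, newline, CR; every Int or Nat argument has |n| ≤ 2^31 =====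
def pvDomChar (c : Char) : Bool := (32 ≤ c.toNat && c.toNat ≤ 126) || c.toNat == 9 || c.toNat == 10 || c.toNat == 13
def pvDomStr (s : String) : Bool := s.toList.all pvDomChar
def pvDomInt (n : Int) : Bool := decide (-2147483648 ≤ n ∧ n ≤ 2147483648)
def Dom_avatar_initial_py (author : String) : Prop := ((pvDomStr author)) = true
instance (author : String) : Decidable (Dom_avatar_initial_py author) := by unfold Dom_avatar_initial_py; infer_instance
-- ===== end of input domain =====

-- B collapses A's two scans into one pass that returns on the first letter and remembers the first alphanumeric char for the fallback (alternative decomposition, same return values).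


-- ===== PORT A =====
-- first loop of A: first alphabetic character
def pvFindAlpha : List Char → Option Char
  | [] => none
  | c :: cs => if PySem.Chars.isalpha c then some c else pvFindAlpha cs

-- second loop of A: first alphanumeric character
def pvFindAlnum : List Char → Option Char
  | [] => none
  | c :: cs => if PySem.Chars.isalnum c then some c else pvFindAlnum cs

def avatar_initial_py (author : String) : String :=
  match pvFindAlpha author.toList with
  | some c => String.ofList [PySem.Chars.upperChar c]
  | none =>
    match pvFindAlnum author.toList with
    | some c => String.ofList [PySem.Chars.upperChar c]
    | none => "?"

-- ===== PORT B =====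
-- B's single loop, carrying the first-recorded alphanumeric char
def pvAvatarLoop : List Char → Option Char → String
  | [], first =>
    match first with
    | some c => String.ofList [PySem.Chars.upperChar c]
    | none => "?"
  | c :: cs, first =>
    if PySem.Chars.isalpha c then String.ofList [PySem.Chars.upperChar c]
    else pvAvatarLoop cs (if first.isNone && PySem.Chars.isalnum c then some c else first)

def avatar_initial_py_alt (author : String) : String :=
  pvAvatarLoop author.toList none

-- ===== PRECONDITION & SPEC =====
def Spec_avatar_initial_py (author : String) (out : String) : Prop := out = avatar_initial_py_alt author
instance (author : String) (out : String) : Decidable (Spec_avatar_initial_py author out) := by unfold Spec_avatar_initial_py; infer_instance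

-- ===== CLAIM (what is proved, stated in full; the proofs are below) =====
def Claim_equal_avatar_initial_py : Prop := ∀ (author : String), Dom_avatar_initial_py author → Spec_avatar_initial_py author (avatar_initial_py author)

-- ===== LEMMAS AND PROOFS =====
theorem pvAvatarLoop_eq (l : List Char) (first : Option Char) :
    pvAvatarLoop l first =
      match pvFindAlpha l with
      | some c => String.ofList [PySem.Chars.upperChar c]
      | none =>
        match first with
        | some c => String.ofList [PySem.Chars.upperChar c]
        | none =>
          match pvFindAlnum l with
          | some c => String.ofList [PySem.Chars.upperChar c]
          | none => "?" := by
  induction l generalizing first with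
  | nil => cases first <;> simp [pvAvatarLoop, pvFindAlpha, pvFindAlnum]
  | cons c cs ih =>
    by_cases ha : PySem.Chars.isalpha c = true
    · simp [pvAvatarLoop, pvFindAlpha, ha]
    · cases first with
      | some f =>
        simp [pvAvatarLoop, pvFindAlpha, ha, ih]
      | none =>
        by_cases hn : PySem.Chars.isalnum c = true
        · simp [pvAvatarLoop, pvFindAlpha, pvFindAlnum, ha, hn, ih]
        · simp [pvAvatarLoop, pvFindAlpha, pvFindAlnum, ha, hn, ih]

-- ===== VERDICT (by name: the statement is the Claim_ definition above) =====
theorem avatar_initial_py_spec : Claim_equal_avatar_initial_py := by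
  intro author _
  unfold Spec_avatar_initial_py avatar_initial_py avatar_initial_py_alt
  rw [pvAvatarLoop_eq]
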